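-- pv_equiv track=rewrite | github.com/KpihX/bw-mcp | src/bw_proxy/logic.py | _split_active_and_trash_rows
-- ===== SOURCE A (Python) =====
-- from typing import Dict, Any, List, Optional, Annotated
--
-- def _dedupe_by_id(rows: List[Dict[str, Any]]) -> List[Dict[str, Any]]:
--     deduped: List[Dict[str, Any]] = []
--     seen_ids: set[str] = set()
--     for row in rows:
--         row_id = row.get("id")
--         if row_id:
--             if row_id in seen_ids:
--                 continue
--             seen_ids.add(row_id)
--         deduped.append(row)
--     return deduped
--
-- def _split_active_and_trash_rows(
--     active_rows: List[Dict[str, Any]],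
--     trash_rows: List[Dict[str, Any]],
-- ) -> tuple[List[Dict[str, Any]], List[Dict[str, Any]]]:
--     """
--     Some Bitwarden CLI versions can surface the same entity in both active and trash list calls.
--     Prefer the explicit trash result and remove duplicates from the active side.
--     """
--     trash_rows = _dedupe_by_id(trash_rows)
--     trash_ids = {row.get("id") for row in trash_rows if row.get("id")}
--     active_rows = _dedupe_by_id(
--         [row for row in active_rows if not row.get("id") or row.get("id") not in trash_ids]
--     )
--     return active_rows, trash_rows
-- ===== SOURCE B (Python) =====
-- # Position-based alternative: a row is kept iff no earlier row (and, for active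
-- # rows, no trash row) shares its truthy id, decided by direct prefix scans --
-- # no seen-sets or id-sets are built at all.
-- def _no_id_match(rows, rid):
--     return all(r.get("id") != rid for r in rows)
--
-- def _split_active_and_trash_rows(active_rows, trash_rows):
--     trash = [row for i, row in enumerate(trash_rows)
--              if not row.get("id") or _no_id_match(trash_rows[:i], row.get("id"))]
--     active = [row for i, row in enumerate(active_rows)
--               if not row.get("id")
--               or (_no_id_match(trash_rows, row.get("id"))
--                   and _no_id_match(active_rows[:i], row.get("id")))]
--     return active, trash
-- ===== Notes on version B (the rewrite author's own statement) =====
-- stated objective: alternative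
-- what changed: Replaces A's seen-set/trash-id-set streaming dedupe with position-based filtering: a row is kept iff its id is falsy or no earlier row (and, for active rows, no trash row) carries the same id, decided by direct prefix scans with no auxiliary sets.
import Mathlib
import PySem

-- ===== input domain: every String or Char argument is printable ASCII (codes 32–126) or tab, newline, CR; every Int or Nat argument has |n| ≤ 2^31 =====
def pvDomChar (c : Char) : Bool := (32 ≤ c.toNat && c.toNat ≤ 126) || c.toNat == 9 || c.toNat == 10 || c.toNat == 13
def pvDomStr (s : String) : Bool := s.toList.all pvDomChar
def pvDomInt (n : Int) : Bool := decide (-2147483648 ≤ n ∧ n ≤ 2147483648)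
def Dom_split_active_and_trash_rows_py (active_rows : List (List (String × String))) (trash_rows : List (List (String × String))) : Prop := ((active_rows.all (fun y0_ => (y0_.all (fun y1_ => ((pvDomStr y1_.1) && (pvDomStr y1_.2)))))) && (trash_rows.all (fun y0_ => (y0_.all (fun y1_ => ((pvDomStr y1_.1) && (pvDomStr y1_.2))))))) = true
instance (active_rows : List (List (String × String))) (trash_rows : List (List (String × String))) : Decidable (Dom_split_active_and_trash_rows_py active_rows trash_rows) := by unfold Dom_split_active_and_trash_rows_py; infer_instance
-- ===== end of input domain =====

-- B replaces A's seen-set/id-set streaming dedupe with position-based filtering by direct prefix scans (alternative algorithm, no auxiliary sets; not faster).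


-- ===== PORT A =====
-- row.get("id") (dict lookup, first match; none = key absent)
def pvId (row : List (String × String)) : Option String :=
  PySem.Dict.get? ⟨row⟩ "id"

-- one iteration of A's _dedupe_by_id loop over state (deduped, seen_ids)
def dedupeStep (st : List (List (String × String)) × PySem.Set String)
    (row : List (String × String)) : List (List (String × String)) × PySem.Set String :=
  match pvId row with
  | some rid =>
      if rid ≠ "" then
        if st.2.contains rid then st
        else (st.1 ++ [row], st.2.add rid)
      else (st.1 ++ [row], st.2)
  | none => (st.1 ++ [row], st.2)

-- A's helper _dedupe_by_id
def dedupeById (rows : List (List (String × String))) : List (List (String × String)) :=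
  (rows.foldl dedupeStep ([], PySem.Set.empty)).1

-- the set comprehension {row.get("id") for row in trash_rows if row.get("id")}
def idsStep (s : PySem.Set String) (row : List (String × String)) : PySem.Set String :=
  match pvId row with
  | some rid => if rid ≠ "" then s.add rid else s
  | none => s

def split_active_and_trash_rows_py (active_rows : List (List (String × String))) (trash_rows : List (List (String × String))) : (List (List (String × String))) × (List (List (String × String))) :=
  let trash2 := dedupeById trash_rows
  let trashIds := trash2.foldl idsStep PySem.Set.empty
  let filtered := active_rows.filter (fun row =>
    match pvId row with
    | some rid => if rid ≠ "" then !(trashIds.contains rid) else true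
    | none => true)
  (dedupeById filtered, trash2)

-- ===== PORT B =====
-- all(r.get("id") != rid for r in rows)  (B's helper _no_id_match)
def noIdMatch (rows : List (List (String × String))) (rid : String) : Bool :=
  rows.all (fun r => !(pvId r == some rid))

-- B: keep a row iff its id is falsy or no earlier row (prefix slice rows[:i])
-- — and, on the active side, no trash row — carries the same id
def split_active_and_trash_rows_py_alt (active_rows : List (List (String × String))) (trash_rows : List (List (String × String))) : (List (List (String × String))) × (List (List (String × String))) :=
  let trash := ((PySem.List.enumerate trash_rows).filter (fun p =>
      match pvId p.2 with
      | some rid => if rid = "" then true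
          else noIdMatch (PySem.List.slice trash_rows none (some p.1)) rid
      | none => true)).map (·.2)
  let active := ((PySem.List.enumerate active_rows).filter (fun p =>
      match pvId p.2 with
      | some rid => if rid = "" then true
          else noIdMatch trash_rows rid
            && noIdMatch (PySem.List.slice active_rows none (some p.1)) rid
      | none => true)).map (·.2)
  (active, trash)

-- ===== PRECONDITION & SPEC =====
def Spec_split_active_and_trash_rows_py (active_rows : List (List (String × String))) (trash_rows : List (List (String × String))) (out : (List (List (String × String))) × (List (List (String × String)))) : Prop := out = split_active_and_trash_rows_py_alt active_rows trash_rows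
instance (active_rows : List (List (String × String))) (trash_rows : List (List (String × String))) (out : (List (List (String × String))) × (List (List (String × String)))) : Decidable (Spec_split_active_and_trash_rows_py active_rows trash_rows out) := by unfold Spec_split_active_and_trash_rows_py; infer_instance

-- ===== CLAIM (what is proved, stated in full; the proofs are below) =====
def Claim_equal_split_active_and_trash_rows_py : Prop := ∀ (active_rows : List (List (String × String))) (trash_rows : List (List (String × String))), Dom_split_active_and_trash_rows_py active_rows trash_rows → Spec_split_active_and_trash_rows_py active_rows trash_rows (split_active_and_trash_rows_py active_rows trash_rows)

-- ===== LEMMAS AND PROOFS =====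

-- recursive characterisation of A's dedupe fold (output list only)
def dd (S : PySem.Set String) : List (List (String × String)) → List (List (String × String))
  | [] => []
  | r :: rs =>
    match pvId r with
    | none => r :: dd S rs
    | some rid =>
        if rid = "" then r :: dd S rs
        else if S.contains rid then dd S rs
        else r :: dd (S.add rid) rs

theorem foldl_dedupe_eq_dd (rows : List (List (String × String)))
    (acc : List (List (String × String))) (S : PySem.Set String) :
    (rows.foldl dedupeStep (acc, S)).1 = acc ++ dd S rows := by
  induction rows generalizing acc S with
  | nil => simp [dd]
  | cons r rs ih =>
      simp only [List.foldl_cons, dedupeStep, dd]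
      cases hid : pvId r with
      | none => simp [ih]
      | some rid =>
          by_cases h : rid = ""
          · simp [h, ih]
          · by_cases hm : rid ∈ S
            · simp [PySem.Set.contains, h, hm, ih]
            · simp [PySem.Set.contains, h, hm, ih]

-- B's generic one-sided computation, recursively: pre = rows already passed
def ddB (ok : String → Bool) (pre : List (List (String × String))) :
    List (List (String × String)) → List (List (String × String))
  | [] => []
  | r :: rs =>
    match pvId r with
    | none => r :: ddB ok (pre ++ [r]) rs
    | some rid =>
        if rid = "" then r :: ddB ok (pre ++ [r]) rs
        else if ok rid && noIdMatch pre rid then r :: ddB ok (pre ++ [r]) rs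
        else ddB ok (pre ++ [r]) rs

-- A's filter predicate on the active side, generically
def qFilt (ok : String → Bool) (row : List (String × String)) : Bool :=
  match pvId row with
  | some rid => if rid ≠ "" then ok rid else true
  | none => true

-- the bridge: B's enumerate/filter/slice comprehension equals ddB
theorem enum_filter_eq_ddB (ok : String → Bool) (rows pre : List (List (String × String))) :
    ((PySem.List.enumerate rows (pre.length : Int)).filter (fun p =>
        match pvId p.2 with
        | some rid => if rid = "" then true
            else ok rid && noIdMatch (PySem.List.slice (pre ++ rows) none (some p.1)) rid
        | none => true)).map (·.2) = ddB ok pre rows := by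
  induction rows generalizing pre with
  | nil => simp [PySem.List.enumerate_nil, ddB]
  | cons r rs ih =>
      have hslice : PySem.List.slice (pre ++ r :: rs) none (some (pre.length : Int)) = pre := by
        rw [PySem.List.slice_to_natCast]; exact List.take_left
      have hlen : (pre.length : Int) + 1 = ((pre ++ [r]).length : Int) := by
        simp
      have hrest : pre ++ r :: rs = (pre ++ [r]) ++ rs := by simp
      rw [PySem.List.enumerate_cons, List.filter_cons]
      cases hid : pvId r with
      | none =>
          rw [if_pos (by simp)]
          simp only [ddB, hid, List.map_cons]
          rw [hlen, hrest, ih]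
      | some rid =>
          by_cases h : rid = ""
          · rw [if_pos (by simp [h])]
            simp only [ddB, hid, List.map_cons]
            rw [if_pos h, hlen, hrest, ih]
          · by_cases hk : ok rid && noIdMatch pre rid
            · rw [if_pos (by simp only [hslice]; simp [h, hk])]
              simp only [ddB, hid, List.map_cons]
              rw [if_neg h, if_pos hk, hlen, hrest, ih]
            · rw [if_neg (by simp only [hslice]; simp [h]; simpa using hk)]
              simp only [ddB, hid]
              rw [if_neg h, if_neg hk, hlen, hrest, ih]

-- A's filter-then-dedupe equals B's positional scan, under the seen-set invariant
theorem dd_filter_eq_ddB (ok : String → Bool) (rows : List (List (String × String)))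
    (pre : List (List (String × String))) (S : PySem.Set String)
    (hinv : ∀ rid, rid ≠ "" → ok rid = true → S.contains rid = !(noIdMatch pre rid)) :
    dd S (rows.filter (qFilt ok)) = ddB ok pre rows := by
  induction rows generalizing pre S with
  | nil => simp [dd, ddB]
  | cons r rs ih =>
      have hpre : ∀ rid', pvId r ≠ some rid' →
          noIdMatch (pre ++ [r]) rid' = noIdMatch pre rid' := by
        intro rid' hne
        simp [noIdMatch, List.all_append]
        intro _; simpa using hne
      rw [List.filter_cons]
      cases hid : pvId r with
      | none =>
          have hq : qFilt ok r = true := by simp [qFilt, hid]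
          rw [if_pos hq]
          simp only [dd, hid, ddB]
          refine congrArg _ (ih _ _ ?_)
          intro rid hne hok
          rw [hpre rid (by simp [hid]), hinv rid hne hok]
      | some rid =>
          by_cases h : rid = ""
          · have hq : qFilt ok r = true := by simp [qFilt, hid, h]
            rw [if_pos hq]
            simp only [dd, hid, if_pos h, ddB]
            refine congrArg _ (ih _ _ ?_)
            intro rid' hne hok
            have hne2 : pvId r ≠ some rid' := by
              rw [hid, h]; intro e; exact hne (Option.some.inj e).symm
            rw [hpre rid' hne2, hinv rid' hne hok]
          · by_cases hok : ok rid = true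
            · have hq : qFilt ok r = true := by simp [qFilt, hid, h, hok]
              rw [if_pos hq]
              simp only [dd, hid, if_neg h, ddB, hok, Bool.true_and]
              rw [hinv rid h hok]
              by_cases hm : noIdMatch pre rid = true
              · rw [hm]
                simp only [Bool.not_true, Bool.false_eq_true, if_false]
                refine congrArg _ (ih _ _ ?_)
                intro rid' hne hok'
                by_cases he : rid' = rid
                · subst he
                  have h1 : noIdMatch (pre ++ [r]) rid' = false := by
                    simp [noIdMatch, List.all_append, hid]
                  have h2 : (S.add rid').contains rid' = true := by
                    simp [PySem.Set.mem_add]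
                  rw [h1, h2]; rfl
                · have hne2 : pvId r ≠ some rid' := by
                    rw [hid]; intro e; exact he (Option.some.inj e).symm
                  rw [hpre rid' hne2, ← hinv rid' hne hok']
                  simp [PySem.Set.mem_add, he]
              · simp only [Bool.not_eq_true] at hm
                rw [hm]
                simp only [Bool.not_false, if_true]
                refine ih _ _ ?_
                intro rid' hne hok'
                by_cases he : rid' = rid
                · subst he
                  have h1 : noIdMatch (pre ++ [r]) rid' = false := by
                    simp [noIdMatch, List.all_append, hid]
                  rw [h1, hinv rid' hne hok', hm]
                · have hne2 : pvId r ≠ some rid' := by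
                    rw [hid]; intro e; exact he (Option.some.inj e).symm
                  rw [hpre rid' hne2, hinv rid' hne hok']
            · have hokf : ok rid = false := by simpa using hok
              have hq : qFilt ok r = false := by
                simp [qFilt, hid, h, hokf]
              rw [if_neg (by simp [hq])]
              simp only [ddB, hid, if_neg h]
              rw [if_neg (by simp [hokf])]
              refine ih _ _ ?_
              intro rid' hne hok'
              have he : rid' ≠ rid := fun e => by rw [e] at hok'; rw [hokf] at hok'; exact absurd hok' (by simp)
              have hne2 : pvId r ≠ some rid' := by
                rw [hid]; intro e; exact he (Option.some.inj e).symm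
              rw [hpre rid' hne2, hinv rid' hne hok']

-- membership in the id-set fold
theorem mem_foldl_idsStep (rows : List (List (String × String))) (S : PySem.Set String)
    (rid : String) (hne : rid ≠ "") :
    (rows.foldl idsStep S).contains rid
      = (S.contains rid || !(noIdMatch rows rid)) := by
  induction rows generalizing S with
  | nil => simp [noIdMatch]
  | cons r rs ih =>
      rw [List.foldl_cons]
      have hall : noIdMatch (r :: rs) rid = ((!(pvId r == some rid)) && noIdMatch rs rid) := by
        simp [noIdMatch]
      cases hid : pvId r with
      | none =>
          simp only [idsStep, hid]
          rw [ih, hall]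
          simp [hid]
      | some rid' =>
          by_cases h : rid' = ""
          · simp only [idsStep, hid, h]
            rw [if_neg (by simp), ih, hall]
            have hb : ("" == rid) = false := beq_eq_false_iff_ne.mpr (Ne.symm hne)
            simp [hid, h, hb]
          · simp only [idsStep, hid]
            rw [if_pos (by simpa using h), ih, hall]
            by_cases he : rid' = rid
            · subst he
              simp only [PySem.Set.contains] at *
              simp [PySem.Set.mem_add, hid]
            · have he2 : rid ≠ rid' := Ne.symm he
              have hb : (rid' == rid) = false := beq_eq_false_iff_ne.mpr he
              simp [PySem.Set.mem_add, he2, hid, hb]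

-- dedupe keeps at least one row per id: id-presence is unchanged
theorem dd_none {r : List (String × String)} {rs : List (List (String × String))}
    {S : PySem.Set String} (hid : pvId r = none) : dd S (r :: rs) = r :: dd S rs := by
  simp [dd, hid]

theorem dd_empty {r : List (String × String)} {rs : List (List (String × String))}
    {S : PySem.Set String} (hid : pvId r = some "") : dd S (r :: rs) = r :: dd S rs := by
  simp [dd, hid]

theorem dd_seen {r : List (String × String)} {rs : List (List (String × String))}
    {S : PySem.Set String} {rid : String} (hid : pvId r = some rid) (h : rid ≠ "")
    (hm : S.contains rid = true) : dd S (r :: rs) = dd S rs := by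
  have hm' : rid ∈ S := by simpa using hm
  simp [dd, hid, h, hm']

theorem dd_new {r : List (String × String)} {rs : List (List (String × String))}
    {S : PySem.Set String} {rid : String} (hid : pvId r = some rid) (h : rid ≠ "")
    (hm : S.contains rid = false) : dd S (r :: rs) = r :: dd (S.add rid) rs := by
  have hm' : rid ∉ S := by simpa using hm
  simp [dd, hid, h, hm']

theorem noIdMatch_dd (rows : List (List (String × String))) (S : PySem.Set String)
    (rid : String) (hS : S.contains rid = false) :
    noIdMatch (dd S rows) rid = noIdMatch rows rid := by
  induction rows generalizing S with
  | nil => rfl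
  | cons r rs ih =>
      cases hid : pvId r with
      | none =>
          rw [dd_none hid]
          simp only [noIdMatch, List.all_cons] at ih ⊢
          rw [ih S hS]
      | some rid' =>
          by_cases h : rid' = ""
          · subst h
            rw [dd_empty hid]
            simp only [noIdMatch, List.all_cons] at ih ⊢
            rw [ih S hS]
          · by_cases hm : S.contains rid' = true
            · rw [dd_seen hid h hm]
              have hne : rid' ≠ rid := fun e => by rw [e, hS] at hm; cases hm
              have hb : (pvId r == some rid) = false := by
                rw [hid]; simp [hne]
              have hhead : noIdMatch (r :: rs) rid = noIdMatch rs rid := by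
                simp [noIdMatch, hb]
              rw [hhead, ih S hS]
            · have hm' : S.contains rid' = false := by
                cases hc : S.contains rid' with
                | false => rfl
                | true => exact absurd hc hm
              rw [dd_new hid h hm']
              by_cases he : rid' = rid
              · subst he
                have hb : (pvId r == some rid') = true := by rw [hid]; simp
                simp [noIdMatch, hb]
              · have he2 : rid ≠ rid' := Ne.symm he
                have hS' : (S.add rid').contains rid = false := by
                  simp [PySem.Set.mem_add, he2] at hS ⊢
                  exact hS
                have hb : (pvId r == some rid) = false := by
                  rw [hid]; simp [he]
                simp only [noIdMatch, List.all_cons] at ih ⊢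
                rw [hb]
                simp only [Bool.not_false, Bool.true_and]
                exact ih (S.add rid') hS'

-- ===== VERDICT (by name: the statement is the Claim_ definition above) =====
theorem split_active_and_trash_rows_py_spec : Claim_equal_split_active_and_trash_rows_py := by
  intro active_rows trash_rows _
  unfold Spec_split_active_and_trash_rows_py
  unfold split_active_and_trash_rows_py split_active_and_trash_rows_py_alt
  simp only [dedupeById, foldl_dedupe_eq_dd, List.nil_append]
  have hS0 : ∀ rid : String, (PySem.Set.empty (α := String)).contains rid = false := by
    intro rid; simp [PySem.Set.contains, PySem.Set.empty]
  -- trash side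
  have htrash : dd PySem.Set.empty trash_rows
      = ((PySem.List.enumerate trash_rows).filter (fun p =>
          match pvId p.2 with
          | some rid => if rid = "" then true
              else noIdMatch (PySem.List.slice trash_rows none (some p.1)) rid
          | none => true)).map (·.2) := by
    have h1 := enum_filter_eq_ddB (fun _ => true) trash_rows []
    have h2 := dd_filter_eq_ddB (fun _ => true) trash_rows [] PySem.Set.empty
      (by intro rid _ _; simp [noIdMatch])
    have h3 : trash_rows.filter (qFilt (fun _ => true)) = trash_rows := by
      apply List.filter_eq_self.mpr
      intro r _; simp [qFilt]; cases pvId r <;> simp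
    rw [h3] at h2
    rw [h2, ← h1]
    simp only [List.length_nil, Int.natCast_zero, List.nil_append]
    apply congrArg; apply List.filter_congr
    intro p _
    cases pvId p.2 with
    | none => rfl
    | some rid => by_cases h : rid = "" <;> simp [h]
  -- active side
  have hok : ∀ rid : String, rid ≠ "" →
      (!(((dd PySem.Set.empty trash_rows).foldl idsStep PySem.Set.empty).contains rid))
        = noIdMatch trash_rows rid := by
    intro rid hne
    rw [mem_foldl_idsStep _ _ _ hne, noIdMatch_dd _ _ _ (hS0 rid)]
    simp
  have hactive : dd PySem.Set.empty (active_rows.filter (fun row =>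
        match pvId row with
        | some rid => if rid ≠ ""
            then !(((dd PySem.Set.empty trash_rows).foldl idsStep PySem.Set.empty).contains rid)
            else true
        | none => true))
      = ((PySem.List.enumerate active_rows).filter (fun p =>
          match pvId p.2 with
          | some rid => if rid = "" then true
              else noIdMatch trash_rows rid
                && noIdMatch (PySem.List.slice active_rows none (some p.1)) rid
          | none => true)).map (·.2) := by
    set okB : String → Bool := fun rid => noIdMatch trash_rows rid with hokB
    have h1 := enum_filter_eq_ddB okB active_rows []
    have h2 := dd_filter_eq_ddB okB active_rows [] PySem.Set.empty
      (by intro rid _ _; simp [noIdMatch])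
    have h3 : active_rows.filter (fun row =>
        match pvId row with
        | some rid => if rid ≠ ""
            then !(((dd PySem.Set.empty trash_rows).foldl idsStep PySem.Set.empty).contains rid)
            else true
        | none => true) = active_rows.filter (qFilt okB) := by
      apply List.filter_congr
      intro r _
      cases hid : pvId r with
      | none => simp [qFilt, hid]
      | some rid =>
          by_cases h : rid = ""
          · simp [qFilt, hid, h]
          · simp only [qFilt, hid, if_pos (by simpa using h : ¬rid = "")]
            exact hok rid h
    rw [h3, h2, ← h1]
    simp only [hokB, List.length_nil, Int.natCast_zero, List.nil_append]
  rw [hactive, htrash]
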